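-- pv_equiv track=rewrite | github.com/jacek-kijewski/wordclock | led_mapping.py | get_led_numbers
-- ===== SOURCE A (Python) =====
-- LETTERS = [
--     ['I', 'T', 'L', 'I', 'S', 'X', 'S', 'A', 'M', 'P', 'M'],
--     ['X', 'C', 'Q', 'U', 'A', 'R', 'T', 'E', 'R', 'D', 'C'],
--     ['T', 'W', 'E', 'N', 'T', 'Y', 'F', 'I', 'V', 'E', 'X'],
--     ['H', 'A', 'L', 'F', 'S', 'T', 'E', 'N', 'F', 'T', 'O'],
--     ['P', 'A', 'S', 'T', 'E', 'R', 'U', 'N', 'I', 'N', 'E'],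
--     ['O', 'N', 'E', 'S', 'I', 'X', 'T', 'H', 'R', 'E', 'E'],
--     ['F', 'O', 'U', 'R', 'F', 'I', 'V', 'E', 'T', 'W', 'O'],
--     ['E', 'I', 'G', 'H', 'T', 'E', 'L', 'E', 'V', 'E', 'N'],
--     ['S', 'E', 'V', 'E', 'N', 'T', 'W', 'E', 'L', 'V', 'E'],
--     ['T', 'E', 'N', 'S', 'E', 'O', 'C', 'L', 'O', 'C', 'K'],
-- ]
--
-- LED_INDEXES = [
--     [101, 99, 97, 95, 93, 91, 89, 87, 85, 83, 81],  # strip 1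
--     [58, 60, 62, 64, 66, 68, 70, 72, 74, 76, 78],  # strip 1
--     [55, 53, 51, 49, 47, 45, 43, 41, 39, 37, 35],  # strip 1
--     [12, 14, 16, 18, 20, 22, 24, 26, 28, 30, 32],  # strip 1
--     [136, 134, 132, 130, 128, 126, 124, 122, 120, 118, 116],  # strip 2
--     [93, 95, 97, 99, 101, 103, 105, 107, 109, 111, 113],  # strip 2
--     [90, 88, 86, 84, 82, 80, 78, 76, 74, 72, 70],  # strip 2
--     [47, 49, 51, 53, 55, 57, 59, 61, 63, 65, 67],  # strip 2
--     [44, 42, 40, 38, 36, 34, 32, 30, 28, 26, 24],  # strip 2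
--     [1, 3, 5, 7, 9, 11, 13, 15, 17, 19, 21],  # strip 2
-- ]
--
-- STRIP_SEPARATOR_ROW = 4
--
-- def get_led_numbers(sentence):
--     """
--     Traverse the grid once to extract LED numbers for the given sentence by matching continuous words.
--
--     :param sentence: Input string (e.g., "IT IS FIVE PAST TEN").
--     :return: Two lists: (strip1_leds, strip2_leds).
--     :raises ValueError: If any word cannot be matched.
--     """
--     # Normalize the sentence
--     words = sentence.upper().split()  # Split into words
--
--     # Initialize LED lists
--     strip1_leds = []
--     strip2_leds = []
--
--     # Traverse the LETTERS grid until all words are matched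
--     for row_idx, row in enumerate(LETTERS):
--         row_string = ''.join(row)  # Combine row into a single string
--         search_start = 0
--         while words:  # Process as long as there are words left
--
--             if search_start >= len(row_string):
--                 break
--
--             word = words[0]  # Look at the first word
--             start_index = row_string.find(word, search_start)  # Search for the word in the current row
--
--             if start_index != -1:  # If the word is found
--                 # Map LEDs for the word
--                 for char_idx in range(start_index, start_index + len(word)):
--                     led = LED_INDEXES[row_idx][char_idx]
--                     if row_idx < STRIP_SEPARATOR_ROW:
--                         strip1_leds.append(led)
--                     else:
--                         strip2_leds.append(led)
--
--                 search_start = start_index + len(word)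
--                 words.pop(0)  # Remove the matched word
--             else:
--                 break  # Move to the next row if the word isn't found in the current row
--
--         if not words:  # Break early if all words are matched
--             break
--
--     # If there are unmatched words
--     if words:
--         raise ValueError(f"Cannot match words: {' '.join(words)}")
--
--     return strip1_leds, strip2_leds
-- ===== SOURCE B (Python) =====
-- ROWS = [
--     "ITLISXSAMPM",
--     "XCQUARTERDC",
--     "TWENTYFIVEX",
--     "HALFSTENFTO",
--     "PASTERUNINE",
--     "ONESIXTHREE",
--     "FOURFIVETWO",
--     "EIGHTELEVEN",
--     "SEVENTWELVE",
--     "TENSEOCLOCK",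
-- ]
--
-- # Each LED_INDEXES row of the original is an arithmetic progression: (first value, step).
-- LED_BASE = [
--     (101, -2), (58, 2), (55, -2), (12, 2), (136, -2),
--     (93, 2), (90, -2), (47, 2), (44, -2), (1, 2),
-- ]
--
-- STRIP_SEPARATOR_ROW = 4
--
--
-- def get_led_numbers(sentence):
--     """Word-driven (row, col) cursor over string rows; LEDs computed as base + step*col."""
--     words = sentence.upper().split()
--     strip1, strip2 = [], []
--     row, col = 0, 0
--     for i, word in enumerate(words):
--         start = -1
--         while row < len(ROWS) and (start := ROWS[row].find(word, col)) == -1: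
--             row += 1
--             col = 0
--         if row >= len(ROWS):
--             raise ValueError(f"Cannot match words: {' '.join(words[i:])}")
--         base, step = LED_BASE[row]
--         out = strip1 if row < STRIP_SEPARATOR_ROW else strip2
--         out.extend(base + step * (start + k) for k in range(len(word)))
--         col = start + len(word)
--     return strip1, strip2
-- ===== Notes on version B (the rewrite author's own statement) =====
-- stated objective: alternative
-- what changed: A scans the letter grid row by row, popping matched words off a mutable word queue and reading each LED from the LED_INDEXES table one character at a time; B iterates over the words with a forward-only (row, col) cursor over string rows and generates each word's LEDs arithmetically (base + step*col), dropping the LED table entirely.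
import Mathlib
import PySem

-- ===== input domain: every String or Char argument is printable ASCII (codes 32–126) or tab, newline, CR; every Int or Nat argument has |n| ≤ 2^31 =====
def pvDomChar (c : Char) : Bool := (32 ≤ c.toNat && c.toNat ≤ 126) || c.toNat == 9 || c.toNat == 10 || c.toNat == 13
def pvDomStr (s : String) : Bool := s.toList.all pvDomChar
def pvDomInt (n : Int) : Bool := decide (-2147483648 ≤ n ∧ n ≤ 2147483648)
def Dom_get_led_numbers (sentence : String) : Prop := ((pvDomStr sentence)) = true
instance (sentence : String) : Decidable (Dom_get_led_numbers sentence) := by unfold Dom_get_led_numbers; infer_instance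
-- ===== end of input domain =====

-- B replaces A's row-driven loop with a mutable word queue by a word-driven forward (row, col)
-- cursor over string rows, and replaces the LED_INDEXES table by the arithmetic formula
-- base + step*col of each row's progression (objective: alternative).

-- ===== PORT A =====
-- A's module constants (Python's LETTERS rows are lists of 1-char strings that A joins;
-- here each row is already its List Char, so ''.join(row) is the row itself)
def pvLetters : List (List Char) :=
  [['I','T','L','I','S','X','S','A','M','P','M'],
   ['X','C','Q','U','A','R','T','E','R','D','C'],
   ['T','W','E','N','T','Y','F','I','V','E','X'],
   ['H','A','L','F','S','T','E','N','F','T','O'],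
   ['P','A','S','T','E','R','U','N','I','N','E'],
   ['O','N','E','S','I','X','T','H','R','E','E'],
   ['F','O','U','R','F','I','V','E','T','W','O'],
   ['E','I','G','H','T','E','L','E','V','E','N'],
   ['S','E','V','E','N','T','W','E','L','V','E'],
   ['T','E','N','S','E','O','C','L','O','C','K']]

def pvLeds : List (List Int) :=
  [[101, 99, 97, 95, 93, 91, 89, 87, 85, 83, 81],
   [58, 60, 62, 64, 66, 68, 70, 72, 74, 76, 78],
   [55, 53, 51, 49, 47, 45, 43, 41, 39, 37, 35],
   [12, 14, 16, 18, 20, 22, 24, 26, 28, 30, 32],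
   [136, 134, 132, 130, 128, 126, 124, 122, 120, 118, 116],
   [93, 95, 97, 99, 101, 103, 105, 107, 109, 111, 113],
   [90, 88, 86, 84, 82, 80, 78, 76, 74, 72, 70],
   [47, 49, 51, 53, 55, 57, 59, 61, 63, 65, 67],
   [44, 42, 40, 38, 36, 34, 32, 30, 28, 26, 24],
   [1, 3, 5, 7, 9, 11, 13, 15, 17, 19, 21]]

def pvSep : Int := 4  -- STRIP_SEPARATOR_ROW

-- A's inner `while words:` loop for one row: pops matched words off the front of the word
-- list, appending each matched letter's LED to strip1 or strip2; search_start is a Nat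
-- (it is 0 or start+len(word) with start ≥ 0, so it never leaves ℕ).
def pvAInner (rowIdx : Int) (rs : List Char) :
    Nat → List (List Char) → List Int → List Int → List (List Char) × List Int × List Int
  | _, [], s1, s2 => ([], s1, s2)
  | ss, w :: ws, s1, s2 =>
    if ss ≥ rs.length then (w :: ws, s1, s2)
    else
      let st := PySem.Chars.findFrom rs w (ss : Int) none
      if st ≠ -1 then
        let p := (PySem.List.pyRange st (st + PySem.List.len w) 1).foldl
          (fun p i =>
            if rowIdx < pvSep then
              (p.1 ++ [PySem.List.pyGetD (PySem.List.pyGetD pvLeds rowIdx []) i 0], p.2)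
            else
              (p.1, p.2 ++ [PySem.List.pyGetD (PySem.List.pyGetD pvLeds rowIdx []) i 0]))
          (s1, s2)
        pvAInner rowIdx rs (st.toNat + w.length) ws p.1 p.2
      else (w :: ws, s1, s2)

-- A's `for row_idx, row in enumerate(LETTERS):` loop with its early `break` when no words remain
def pvAOuter : List (Int × List Char) → List (List Char) → List Int → List Int →
    List (List Char) × List Int × List Int
  | [], ws, s1, s2 => (ws, s1, s2)
  | (i, row) :: rest, ws, s1, s2 =>
    let t := pvAInner i row 0 ws s1 s2
    if t.1 = [] then t else pvAOuter rest t.1 t.2.1 t.2.2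

def get_led_numbers (sentence : String) : List Int × List Int :=
  let words := PySem.Chars.split₀ (PySem.Chars.upper sentence.toList)
  let t := pvAOuter (PySem.List.enumerate pvLetters 0) words [] []
  -- Python raises `ValueError` when t.1 ≠ [] (unmatched words); those inputs are outside Pre_
  (t.2.1, t.2.2)

-- ===== PORT B =====
-- B's constants: the grid rows as plain strings, and per row the (first value, step)
-- of the arithmetic progression of that row's LED numbers.
def pvRows : List (List Char) :=
  ["ITLISXSAMPM".toList, "XCQUARTERDC".toList, "TWENTYFIVEX".toList, "HALFSTENFTO".toList,
   "PASTERUNINE".toList, "ONESIXTHREE".toList, "FOURFIVETWO".toList, "EIGHTELEVEN".toList,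
   "SEVENTWELVE".toList, "TENSEOCLOCK".toList]

def pvBase : List (Int × Int) :=
  [(101, -2), (58, 2), (55, -2), (12, 2), (136, -2), (93, 2), (90, -2), (47, 2), (44, -2), (1, 2)]

-- B's `while row < len(ROWS) and ... == -1:` row-advancing search for one word from the
-- cursor (row, col); none = the cursor ran off the grid, where Python B raises ValueError.
def pvBSearch (w : List Char) (row col : Nat) : Option (Nat × Nat) :=
  if _h : row ≥ pvRows.length then none
  else
    let st := PySem.Chars.findFrom (pvRows.getD row []) w (col : Int) none
    if st = -1 then pvBSearch w (row + 1) 0 else some (row, st.toNat)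
  termination_by pvRows.length - row
  decreasing_by omega

-- B's `for i, word in enumerate(words):` loop carrying the cursor and the two strips;
-- `out.extend(base + step * (start + k) for k in range(len(word)))` is the mapped range.
def pvBLoop : List (List Char) → Nat → Nat → List Int → List Int → List Int × List Int
  | [], _, _, s1, s2 => (s1, s2)
  | w :: ws, row, col, s1, s2 =>
    match pvBSearch w row col with
    | none => (s1, s2)  -- Python B raises ValueError here; such inputs are outside Pre_
    | some (r, st) =>
      let bs := pvBase.getD r (0, 0)
      let seg := (List.range w.length).map (fun k => bs.1 + bs.2 * ((st : Int) + (k : Int)))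
      if (r : Int) < 4 then pvBLoop ws r (st + w.length) (s1 ++ seg) s2
      else pvBLoop ws r (st + w.length) s1 (s2 ++ seg)

def get_led_numbers_alt (sentence : String) : List Int × List Int :=
  pvBLoop (PySem.Chars.split₀ (PySem.Chars.upper sentence.toList)) 0 0 [] []

-- ===== PRECONDITION & SPEC =====
-- A raises ValueError exactly when some word of the sentence cannot be placed by the
-- forward scan of the fixed 10-row grid; "every word occurs at or after the cursor" is the
-- only characterisation of that exception, so Pre_ states it directly as a membership scan
-- over the word list. It is not either port's code: it builds no LED output and carries no
-- strip state; pvFind yields the first placement of one word in the remaining rows.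
def pvFind (w : List Char) : List (List Char) → Nat → Option (List (List Char) × Nat)
  | [], _ => none
  | rs :: rest, col =>
    let st := PySem.Chars.findFrom rs w (col : Int) none
    if st = -1 then pvFind w rest 0 else some (rs :: rest, st.toNat + w.length)

def pvScan : List (List Char) → List (List Char) → Nat → Bool
  | [], _, _ => true
  | w :: ws, rows, col =>
    match pvFind w rows col with
    | none => false
    | some (rows', col') => pvScan ws rows' col'

-- Pre_ excludes exactly the sentences on which Python A raises ValueError (some word cannot
-- be matched by the forward scan); A returns no value there.
def Pre_get_led_numbers (sentence : String) : Prop :=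
  pvScan (PySem.Chars.split₀ (PySem.Chars.upper sentence.toList)) pvLetters 0 = true
instance (sentence : String) : Decidable (Pre_get_led_numbers sentence) := by
  unfold Pre_get_led_numbers; infer_instance

def pvWitness_get_led_numbers : String := "it is ten"

def Spec_get_led_numbers (sentence : String) (out : List Int × List Int) : Prop :=
  out = get_led_numbers_alt sentence
instance (sentence : String) (out : List Int × List Int) : Decidable (Spec_get_led_numbers sentence out) := by
  unfold Spec_get_led_numbers; infer_instance

-- ===== CLAIM (what is proved, stated in full; the proofs are below) =====
def Claim_equal_get_led_numbers : Prop := ∀ (sentence : String), Dom_get_led_numbers sentence →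
  Pre_get_led_numbers sentence → Spec_get_led_numbers sentence (get_led_numbers sentence)

-- ===== LEMMAS AND PROOFS =====

-- B's string rows spell A's letter grid
theorem pv_rows_eq : pvRows = pvLetters := by decide

-- every word produced by str.split() is nonempty (invariant of split₀.go)
theorem pv_go_ne : ∀ (s cur : List Char) (acc : List (List Char)),
    (∀ w ∈ acc, w ≠ []) → ∀ w ∈ PySem.Chars.split₀.go s cur acc, w ≠ [] := by
  intro s
  induction s with
  | nil =>
    intro cur acc hacc w hw
    by_cases hc : cur.isEmpty
    · simp [PySem.Chars.split₀.go, hc] at hw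
      exact hacc w hw
    · simp [PySem.Chars.split₀.go, hc] at hw
      simp only [List.isEmpty_iff] at hc
      rcases hw with h | h
      · exact hacc w h
      · subst h; simp [List.reverse_eq_nil_iff, hc]
  | cons c rest ih =>
    intro cur acc hacc w hw
    by_cases hsp : PySem.Chars.isspace c
    · by_cases hc : cur.isEmpty
      · simp only [PySem.Chars.split₀.go, hsp, hc, if_true] at hw
        exact ih [] acc hacc w hw
      · simp only [PySem.Chars.split₀.go, hsp, hc, if_true] at hw
        refine ih [] (cur.reverse :: acc) ?_ w hw
        intro v hv
        simp only [List.isEmpty_iff] at hc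
        rw [List.mem_cons] at hv
        rcases hv with h | h
        · subst h; simp [List.reverse_eq_nil_iff, hc]
        · exact hacc v h
    · simp only [PySem.Chars.split₀.go, hsp] at hw
      exact ih (c :: cur) acc hacc w hw

theorem pv_words_ne (s : List Char) : ∀ w ∈ PySem.Chars.split₀ s, w ≠ [] := by
  have := pv_go_ne s [] [] (by simp)
  simpa [PySem.Chars.split₀] using this

theorem pv_henum : ∀ r < 10, (PySem.List.enumerate pvLetters 0).drop r =
    ((r : Int), pvLetters.getD r []) :: (PySem.List.enumerate pvLetters 0).drop (r + 1) := by
  decide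

theorem pv_lenL : ∀ r < 10, (pvLetters.getD r []).length = 11 := by decide
theorem pv_lenD : ∀ r < 10, (pvLeds.getD r []).length = 11 := by decide

-- each window of A's LED row is the arithmetic progression B generates
theorem pv_seg : ∀ r < 10, ∀ st < 12, ∀ n < 12, st + n ≤ 11 →
    ((pvLeds.getD r []).drop st).take n =
      (List.range n).map (fun k =>
        (pvBase.getD r (0, 0)).1 + (pvBase.getD r (0, 0)).2 * ((st : Int) + (k : Int))) := by
  decide

-- A's per-character index loop reads exactly a window of its LED row
theorem pv_map_range_getD (X : List Int) (s n : Nat) (h : s + n ≤ X.length) :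
    (PySem.List.pyRange (s : Int) ((s : Int) + (n : Int)) 1).map
      (fun i => PySem.List.pyGetD X i 0) = (X.drop s).take n := by
  induction n generalizing s with
  | zero => simp [PySem.List.pyRange_one_eq_nil]
  | succ n ih =>
    rw [PySem.List.pyRange_one_cons (by omega)]
    have h1 : ((s : Int) + 1) = ((s + 1 : Nat) : Int) := by push_cast; ring
    have h2 : ((s : Int) + ((n + 1 : Nat) : Int)) = ((s + 1 : Nat) : Int) + (n : Nat) := by
      push_cast; ring
    have hs : s < X.length := by omega
    rw [List.map_cons, h2, h1, ih (s + 1) (by omega)]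
    simp [PySem.List.pyGetD_natCast, List.getD_eq_getElem?_getD, hs]
    conv_rhs => rw [List.drop_eq_getElem_cons hs]
    rw [List.take_succ_cons]

-- the strip chosen by `row_idx < STRIP_SEPARATOR_ROW` is constant over the inner loop,
-- so A's fold appends the mapped list to that one strip
theorem pv_foldl_emit_pos {α : Type} (g : Int → α) (l : List Int) (s1 s2 : List α)
    (c : Prop) [Decidable c] (hc : c) :
    l.foldl (fun p i => if c then (p.1 ++ [g i], p.2) else (p.1, p.2 ++ [g i])) (s1, s2)
      = (s1 ++ l.map g, s2) := by
  induction l generalizing s1 with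
  | nil => simp
  | cons x l ih =>
    rw [List.foldl_cons, if_pos hc]
    simpa using ih (s1 ++ [g x])

theorem pv_foldl_emit_neg {α : Type} (g : Int → α) (l : List Int) (s1 s2 : List α)
    (c : Prop) [Decidable c] (hc : ¬ c) :
    l.foldl (fun p i => if c then (p.1 ++ [g i], p.2) else (p.1, p.2 ++ [g i])) (s1, s2)
      = (s1, s2 ++ l.map g) := by
  induction l generalizing s2 with
  | nil => simp
  | cons x l ih =>
    rw [List.foldl_cons, if_neg hc]
    simpa using ih (s2 ++ [g x])

-- proof-side restatement of A's remaining work from row r with fuel 10 - r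
def pvAGo : Nat → Nat → Nat → List (List Char) → List Int → List Int → List Int × List Int
  | 0, _, _, _, s1, s2 => (s1, s2)
  | n + 1, r, col, ws, s1, s2 =>
    let t := pvAInner (r : Int) (pvLetters.getD r []) col ws s1 s2
    if t.1 = [] then t.2 else pvAGo n (r + 1) 0 t.1 t.2.1 t.2.2

theorem pv_outer_eq : ∀ (n r : Nat), r + n = 10 → ∀ ws s1 s2,
    (pvAOuter ((PySem.List.enumerate pvLetters 0).drop r) ws s1 s2).2 = pvAGo n r 0 ws s1 s2 := by
  intro n
  induction n with
  | zero =>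
    intro r hr ws s1 s2
    have : r = 10 := by omega
    subst this
    have hd : (PySem.List.enumerate pvLetters 0).drop 10 = [] := by decide
    simp [hd, pvAOuter, pvAGo]
  | succ n ih =>
    intro r hr ws s1 s2
    rw [pv_henum r (by omega)]
    show (let t := pvAInner (r : Int) (pvLetters.getD r []) 0 ws s1 s2;
      if t.1 = [] then t
      else pvAOuter ((PySem.List.enumerate pvLetters 0).drop (r + 1)) t.1 t.2.1 t.2.2).2
        = pvAGo (n + 1) r 0 ws s1 s2
    simp only [pvAGo]
    set t := pvAInner (r : Int) (pvLetters.getD r []) 0 ws s1 s2 with ht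
    by_cases h : t.1 = []
    · simp [h]
    · simp only [h, if_false]
      exact ih (r + 1) (by omega) t.1 t.2.1 t.2.2

-- one advance-row step of B's search, as pvBLoop sees it
theorem pv_bloop_advance (w : List Char) (ws : List (List Char)) (r col : Nat) (s1 s2 : List Int)
    (hr : r < 10)
    (hst : PySem.Chars.findFrom (pvLetters.getD r []) w (col : Int) none = -1) :
    pvBLoop (w :: ws) r col s1 s2 = pvBLoop (w :: ws) (r + 1) 0 s1 s2 := by
  have hs : pvBSearch w r col = pvBSearch w (r + 1) 0 := by
    rw [pvBSearch]
    have hlt : ¬ r ≥ pvRows.length := by rw [pv_rows_eq]; simp [pvLetters]; omega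
    have hst' : PySem.Chars.findFrom (pvRows[r]?.getD []) w (col : Int) none = -1 := by
      rw [pv_rows_eq]; simpa [List.getD_eq_getElem?_getD] using hst
    simp [hlt, hst']
  simp only [pvBLoop, hs]

-- the central simulation: A's remaining work from the cursor equals B's loop from the cursor
theorem pv_main : ∀ (ws : List (List Char)), (∀ w ∈ ws, w ≠ []) →
    ∀ (n r col : Nat) (s1 s2 : List Int), n = 10 - r → col ≤ 11 →
    pvAGo n r col ws s1 s2 = pvBLoop ws r col s1 s2 := by
  intro ws
  induction ws with
  | nil =>
    intro _ n r col s1 s2 hn hcol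
    cases n with
    | zero => simp [pvAGo, pvBLoop]
    | succ n => simp [pvAGo, pvAInner, pvBLoop]
  | cons w ws ih =>
    intro hne n r col s1 s2 hn hcol
    induction n generalizing r col s1 s2 with
    | zero =>
      have hr : r ≥ 10 := by omega
      have hs : pvBSearch w r col = none := by
        rw [pvBSearch]
        rw [pv_rows_eq]
        simp [pvLetters]
        omega
      simp [pvAGo, pvBLoop, hs]
    | succ n ihn =>
      have hr : r < 10 := by omega
      have hwne : w ≠ [] := hne w (by simp)
      have hlen : (pvLetters.getD r []).length = 11 := pv_lenL r hr
      simp only [pvAGo, pvAInner]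
      by_cases hcol11 : col ≥ (pvLetters.getD r []).length
      · -- search_start ran past the row: A breaks to the next row; B's find returns -1
        have hce : col = 11 := by omega
        have hst : PySem.Chars.findFrom (pvLetters.getD r []) w (col : Int) none = -1 := by
          rw [PySem.Chars.findFrom_natCast_eq_neg_one_iff _ _ col (by omega)]
          intro hinf
          rw [show (pvLetters.getD r []).drop col = [] from by
            apply List.drop_eq_nil_of_le; omega] at hinf
          exact hwne (List.eq_nil_of_infix_nil hinf)
        rw [pv_bloop_advance w ws r col s1 s2 hr hst]
        simp only [hcol11, if_pos]
        simp only [reduceCtorEq, if_false]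
        exact ihn (r + 1) 0 s1 s2 (by omega) (by omega)
      · simp only [ge_iff_le, not_le] at hcol11
        simp only [if_neg (by omega : ¬ col ≥ (pvLetters.getD r []).length)]
        set st := PySem.Chars.findFrom (pvLetters.getD r []) w (col : Int) none with hstdef
        by_cases hst : st = -1
        · -- word not found in this row: both advance to the next row
          rw [pv_bloop_advance w ws r col s1 s2 hr (hstdef.symm.trans hst)]
          rw [if_neg (show ¬ st ≠ -1 from fun h => h hst)]
          rw [if_neg (show ¬ ((w :: ws, s1, s2).1 = []) from by simp)]
          exact ihn (r + 1) 0 s1 s2 (by omega) (by omega)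
        · -- word found at st: A emits per character from the LED table, B generates the
          -- same numbers arithmetically; both move col to st + |w|
          obtain ⟨hcle, hpre, -⟩ :=
            PySem.Chars.findFrom_natCast_spec (pvLetters.getD r []) w col (by omega) hst
          have hst0 : 0 ≤ st := le_trans (by exact_mod_cast Int.natCast_nonneg col) hcle
          have hbound : st.toNat + w.length ≤ 11 := by
            have hb2 : w <+: (pvLetters.getD r []).drop st.toNat := by
              rw [hstdef]; exact hpre
            have hl := hb2.length_le
            rw [List.length_drop, hlen] at hl
            have hw1 : 0 < w.length := List.length_pos_of_ne_nil hwne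
            omega
          have hsearch : pvBSearch w r col = some (r, st.toNat) := by
            rw [pvBSearch]
            have hlt : ¬ r ≥ pvRows.length := by rw [pv_rows_eq]; simp [pvLetters]; omega
            have hst' : PySem.Chars.findFrom (pvRows[r]?.getD []) w (col : Int) none = st := by
              rw [pv_rows_eq]; simpa [List.getD_eq_getElem?_getD] using hstdef.symm
            simp [hlt, hst', hst]
          have hstc : st = ((st.toNat : Nat) : Int) := by omega
          have hlenw : PySem.List.len w = ((w.length : Nat) : Int) := by
            simp [PySem.List.len_eq]
          -- A's fold produces exactly B's arithmetic segment appended to the owning strip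
          have hmap : (PySem.List.pyRange st (st + PySem.List.len w) 1).map
              (fun i => PySem.List.pyGetD (PySem.List.pyGetD pvLeds (r : Int) []) i 0)
                = (List.range w.length).map (fun k =>
                    (pvBase.getD r (0, 0)).1 +
                      (pvBase.getD r (0, 0)).2 * ((st.toNat : Int) + (k : Int))) := by
            rw [hstc, hlenw]
            simp only [PySem.List.pyGetD_natCast, Int.toNat_natCast]
            rw [pv_map_range_getD (pvLeds.getD r []) st.toNat w.length
              (by rw [pv_lenD r hr]; omega)]
            exact pv_seg r hr st.toNat (by omega) w.length (by omega) (by omega)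
          have hsep : ((r : Int) < pvSep) ↔ (r : Int) < 4 := by
            unfold pvSep
            exact Iff.rfl
          rw [if_pos (show st ≠ -1 from hst)]
          rw [show pvBLoop (w :: ws) r col s1 s2 =
              (let seg := (List.range w.length).map (fun k =>
                  (pvBase.getD r (0, 0)).1 +
                    (pvBase.getD r (0, 0)).2 * ((st.toNat : Int) + (k : Int)));
               if (r : Int) < 4 then pvBLoop ws r (st.toNat + w.length) (s1 ++ seg) s2
               else pvBLoop ws r (st.toNat + w.length) s1 (s2 ++ seg)) from by
            simp only [pvBLoop, hsearch]]
          by_cases h4 : (r : Int) < 4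
          · rw [pv_foldl_emit_pos _ _ _ _ _ (hsep.mpr h4)]
            rw [hmap]
            rw [if_pos h4]
            have := ih (fun v hv => hne v (by simp [hv])) (n + 1) r (st.toNat + w.length)
              (s1 ++ (List.range w.length).map (fun k =>
                (pvBase.getD r (0, 0)).1 +
                  (pvBase.getD r (0, 0)).2 * ((st.toNat : Int) + (k : Int)))) s2
              (by omega) (by omega)
            rw [← this]
            simp [pvAGo]
          · rw [pv_foldl_emit_neg _ _ _ _ _ (fun hc => h4 (hsep.mp hc))]
            rw [hmap]
            rw [if_neg h4]
            have := ih (fun v hv => hne v (by simp [hv])) (n + 1) r (st.toNat + w.length)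
              s1 (s2 ++ (List.range w.length).map (fun k =>
                (pvBase.getD r (0, 0)).1 +
                  (pvBase.getD r (0, 0)).2 * ((st.toNat : Int) + (k : Int))))
              (by omega) (by omega)
            rw [← this]
            simp [pvAGo]

theorem pv_final (wsl : List (List Char)) (hne : ∀ w ∈ wsl, w ≠ []) :
    (pvAOuter (PySem.List.enumerate pvLetters 0) wsl [] []).2 = pvBLoop wsl 0 0 [] [] := by
  have h := pv_outer_eq 10 0 (by omega) wsl [] []
  simp only [List.drop_zero] at h
  rw [h]
  exact pv_main wsl hne 10 0 0 [] [] (by omega) (by omega)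

-- ===== VERDICT (by name: the statement is the Claim_ definition above) =====
theorem get_led_numbers_spec : Claim_equal_get_led_numbers := by
  unfold Claim_equal_get_led_numbers
  intro sentence _ _
  show get_led_numbers sentence = get_led_numbers_alt sentence
  exact pv_final _ (pv_words_ne _)
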